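-- pv_equiv track=rewrite | github.com/anubhavgpta/Rica | rica/dep_graph.py | cascade_changed
-- ===== SOURCE A (Python) =====
-- from typing import Dict, List, Set
--
-- def cascade_changed(changed: List[str], graph: Dict[str, Set[str]]) -> List[str]:
--     """Find all files that transitively depend on the changed files.
--
--     Args:
--         changed: List of file paths that have changed
--         graph: Reverse dependency graph (file -> set of files that depend on it)
--
--     Returns:
--         List of all files reachable from the changed files (transitive dependents)
--         that are NOT already in the changed set, deduplicated and sorted.
--     """
--     # BFS/DFS from each changed file
--     all_dependents = set()
--     visited = set()
--     stack = list(changed)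
--
--     while stack:
--         current = stack.pop()
--         if current in visited:
--             continue
--         visited.add(current)
--
--         # Get files that depend on current
--         dependents = graph.get(current, set())
--
--         for dependent in dependents:
--             if dependent not in visited and dependent not in changed:
--                 all_dependents.add(dependent)
--                 stack.append(dependent)
--
--     return sorted(all_dependents)
-- ===== SOURCE B (Python) =====
-- def cascade_changed(changed, graph):
--     """Frontier (level-set) closure: repeatedly expand the whole frontier at once,
--     then subtract the changed set at the end."""
--     visited = set(changed)
--     frontier = set(changed)
--     while frontier:
--         nxt = set()
--         for v in frontier:
--             nxt |= graph.get(v, set())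
--         frontier = nxt - visited
--         visited |= frontier
--     return sorted(visited - set(changed))
-- ===== Notes on version B (the rewrite author's own statement) =====
-- stated objective: faster
-- what changed: Replaces A's per-node stack DFS (which filters every discovered edge against the changed *list* and a separate dependents set) by a frontier/level-set closure over sets only, with one final set subtraction of changed.
import Mathlib
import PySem

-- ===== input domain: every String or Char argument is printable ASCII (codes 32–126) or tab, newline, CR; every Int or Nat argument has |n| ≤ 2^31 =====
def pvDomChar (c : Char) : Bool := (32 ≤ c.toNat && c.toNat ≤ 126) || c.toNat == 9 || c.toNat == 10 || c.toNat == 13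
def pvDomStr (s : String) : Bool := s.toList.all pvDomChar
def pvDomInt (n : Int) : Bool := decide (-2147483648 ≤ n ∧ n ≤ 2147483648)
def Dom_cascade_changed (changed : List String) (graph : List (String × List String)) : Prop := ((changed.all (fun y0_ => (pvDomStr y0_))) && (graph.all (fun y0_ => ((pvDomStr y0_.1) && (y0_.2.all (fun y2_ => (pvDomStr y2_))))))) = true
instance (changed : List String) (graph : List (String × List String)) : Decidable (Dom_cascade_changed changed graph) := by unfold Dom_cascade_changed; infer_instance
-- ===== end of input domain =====

-- B replaces A's per-node stack DFS (whose per-edge `dependent not in changed`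
-- test scans the changed *list*) by a frontier/level-set closure using sets only,
-- subtracting the changed set once at the end (objective: faster, measured).

-- ===== PORT A =====
-- graph.get(v, set())  (shared accessor of the input dict, used by both ports)
def pvGet (graph : List (String × List String)) (v : String) : List String :=
  PySem.Dict.getD (PySem.Dict.mk graph) v []

-- A's inner loop:  for dependent in dependents: if dependent not in visited and
-- dependent not in changed: all_dependents.add(dependent); stack.append(dependent)
def pvPush (changed : List String) (visited' : PySem.Set String) (deps : List String)
    (ad : PySem.Set String) (rest : List String) : PySem.Set String × List String :=
  deps.foldl (fun (p : PySem.Set String × List String) d =>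
    if !(PySem.Set.contains visited' d) && !(changed.contains d)
    then (PySem.Set.add p.1 d, p.2 ++ [d]) else p) (ad, rest)

-- characterisation of pvPush, cited by pvLoopA's decreasing_by and by the proofs
theorem pvPush_spec (changed : List String) (visited' : PySem.Set String)
    (deps : List String) (ad : PySem.Set String) (rest : List String) :
    pvPush changed visited' deps ad rest =
      (PySem.Set.update ad (deps.filter
          (fun d => !(PySem.Set.contains visited' d) && !(changed.contains d))),
       rest ++ deps.filter
          (fun d => !(PySem.Set.contains visited' d) && !(changed.contains d))) := by
  induction deps generalizing ad rest with
  | nil => simp [pvPush, PySem.Set.update]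
  | cons d t ih =>
    by_cases hd : (!(PySem.Set.contains visited' d) && !(changed.contains d)) = true
    · simp only [pvPush, List.foldl_cons, hd, reduceIte]
      rw [show (List.foldl _ _ _ : PySem.Set String × List String) = pvPush changed visited' t (PySem.Set.add ad d) (rest ++ [d]) from rfl, ih]
      simp only [List.filter_cons, hd, reduceIte, List.append_assoc, List.singleton_append]
      rfl
    · rw [Bool.not_eq_true] at hd
      simp only [pvPush, List.foldl_cons, hd, Bool.false_eq_true, reduceIte]
      rw [show (List.foldl _ _ _ : PySem.Set String × List String) = pvPush changed visited' t ad rest from rfl, ih]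
      simp only [List.filter_cons, hd, Bool.false_eq_true, reduceIte]

-- termination measure for A's while loop
def pvCost (graph : List (String × List String)) (v : String) : Nat :=
  1 + (pvGet graph v).length

def pvRemA (graph : List (String × List String)) (visited : List String) : Nat :=
  ∑ v ∈ (graph.map Prod.fst).toFinset \ visited.toFinset, pvCost graph v

theorem pvGet_of_not_key (graph : List (String × List String)) (v : String)
    (h : v ∉ graph.map Prod.fst) : pvGet graph v = [] := by
  have hnone : (PySem.Dict.mk graph).get? v = none := by
    rw [PySem.Dict.get?_eq_none_iff_not_mem_keys]
    simpa [PySem.Dict.keys_mk] using h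
  simp [pvGet, PySem.Dict.getD, hnone]

theorem pvRemA_add_le (graph : List (String × List String)) (visited : List String)
    (v : String) : pvRemA graph (PySem.Set.add visited v) ≤ pvRemA graph visited := by
  unfold pvRemA
  apply Finset.sum_le_sum_of_subset
  apply Finset.sdiff_subset_sdiff (Finset.Subset.refl _)
  intro x hx
  simp only [List.mem_toFinset] at hx ⊢
  exact (PySem.Set.mem_add visited v x).mpr (Or.inl hx)

theorem pvRemA_add_key (graph : List (String × List String)) (visited : List String)
    (v : String) (hk : v ∈ graph.map Prod.fst) (hv : v ∉ visited) :
    pvRemA graph (PySem.Set.add visited v) + pvCost graph v = pvRemA graph visited := by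
  unfold pvRemA
  have hadd : (PySem.Set.add visited v).toFinset = insert v visited.toFinset := by
    ext x
    simp only [List.mem_toFinset, PySem.Set.mem_add, Finset.mem_insert]
    tauto
  rw [hadd]
  have hsd : (graph.map Prod.fst).toFinset \ insert v visited.toFinset
      = ((graph.map Prod.fst).toFinset \ visited.toFinset).erase v := by
    ext x
    simp only [Finset.mem_sdiff, Finset.mem_insert, Finset.mem_erase]
    tauto
  rw [hsd]
  exact Finset.sum_erase_add _ _
    (Finset.mem_sdiff.mpr ⟨List.mem_toFinset.mpr hk, by simpa using hv⟩)

-- A's while loop (stack pops from the end, as Python's list.pop())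
def pvLoopA (changed : List String) (graph : List (String × List String))
    (ad visited : PySem.Set String) (stack : List String) : List String :=
  match stack with
  | [] => PySem.List.sorted ad (fun x => x)
  | s :: rest0 =>
    if h : PySem.Set.contains visited ((s :: rest0).getLast (List.cons_ne_nil s rest0)) then
      pvLoopA changed graph ad visited ((s :: rest0).dropLast)
    else
      pvLoopA changed graph
        (pvPush changed
          (PySem.Set.add visited ((s :: rest0).getLast (List.cons_ne_nil s rest0)))
          (pvGet graph ((s :: rest0).getLast (List.cons_ne_nil s rest0)))
          ad ((s :: rest0).dropLast)).1
        (PySem.Set.add visited ((s :: rest0).getLast (List.cons_ne_nil s rest0)))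
        (pvPush changed
          (PySem.Set.add visited ((s :: rest0).getLast (List.cons_ne_nil s rest0)))
          (pvGet graph ((s :: rest0).getLast (List.cons_ne_nil s rest0)))
          ad ((s :: rest0).dropLast)).2
  termination_by stack.length + pvRemA graph visited
  decreasing_by
  · simp only [List.length_dropLast, List.length_cons]
    omega
  · rw [pvPush_spec]
    have hcv : (s :: rest0).getLast (List.cons_ne_nil s rest0) ∉ visited := fun hm =>
      h ((PySem.Set.contains_iff _ _).mpr hm)
    have hflt := List.length_filter_le
      (fun d => !(PySem.Set.contains (PySem.Set.add visited ((s :: rest0).getLast (List.cons_ne_nil s rest0))) d) && !(changed.contains d))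
      (pvGet graph ((s :: rest0).getLast (List.cons_ne_nil s rest0)))
    by_cases hk : (s :: rest0).getLast (List.cons_ne_nil s rest0) ∈ graph.map Prod.fst
    · have hrem := pvRemA_add_key graph visited _ hk hcv
      have hcost : pvCost graph ((s :: rest0).getLast (List.cons_ne_nil s rest0))
          = 1 + (pvGet graph ((s :: rest0).getLast (List.cons_ne_nil s rest0))).length := rfl
      simp only [List.length_append, List.length_dropLast, List.length_cons]
      omega
    · rw [pvGet_of_not_key graph _ hk]
      have hrem := pvRemA_add_le graph visited ((s :: rest0).getLast (List.cons_ne_nil s rest0))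
      simp only [List.filter_nil, List.append_nil, List.length_dropLast, List.length_cons]
      omega

def cascade_changed (changed : List String) (graph : List (String × List String)) :
    List String :=
  pvLoopA changed graph PySem.Set.empty PySem.Set.empty changed

-- ===== PORT B =====
-- nxt = set(); for v in frontier: nxt |= graph.get(v, set())
def pvNext (graph : List (String × List String)) (frontier : PySem.Set String) :
    PySem.Set String :=
  frontier.foldl (fun n v => PySem.Set.union n (pvGet graph v)) PySem.Set.empty

-- cited by pvLoopB's decreasing_by and by the proofs
theorem pvMem_fold_union (graph : List (String × List String)) (l : List String)
    (n : PySem.Set String) (y : String) :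
    y ∈ l.foldl (fun n v => PySem.Set.union n (pvGet graph v)) n ↔
      y ∈ n ∨ ∃ v ∈ l, y ∈ pvGet graph v := by
  induction l generalizing n with
  | nil => simp
  | cons a t ih =>
    simp only [List.foldl_cons, ih, PySem.Set.mem_union, List.mem_cons]
    constructor
    · rintro ((h | h) | ⟨v, hv, hy⟩)
      · exact Or.inl h
      · exact Or.inr ⟨a, Or.inl rfl, h⟩
      · exact Or.inr ⟨v, Or.inr hv, hy⟩
    · rintro (h | ⟨v, (rfl | hv), hy⟩)
      · exact Or.inl (Or.inl h)
      · exact Or.inl (Or.inr hy)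
      · exact Or.inr ⟨v, hv, hy⟩

def pvValsFin (graph : List (String × List String)) : Finset String :=
  (graph.flatMap Prod.snd).toFinset

theorem pvGet_sub_vals (graph : List (String × List String)) (v y : String)
    (h : y ∈ pvGet graph v) : y ∈ graph.flatMap Prod.snd := by
  unfold pvGet PySem.Dict.getD at h
  cases hg : (PySem.Dict.mk graph).get? v with
  | none => rw [hg] at h; simp at h
  | some l =>
    rw [hg] at h
    simp only [Option.getD_some] at h
    simp only [PySem.Dict.get?, Option.map_eq_some_iff] at hg
    obtain ⟨p, hfind, hpl⟩ := hg
    exact List.mem_flatMap.mpr ⟨p, List.mem_of_find?_eq_some hfind, hpl ▸ h⟩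

-- B's while loop: expand the whole frontier, subtract visited, absorb, repeat
def pvLoopB (graph : List (String × List String))
    (visited frontier : PySem.Set String) : PySem.Set String :=
  match frontier with
  | [] => visited
  | x :: fr =>
    pvLoopB graph
      (PySem.Set.union visited (PySem.Set.diff (pvNext graph (x :: fr)) visited))
      (PySem.Set.diff (pvNext graph (x :: fr)) visited)
  termination_by ((pvValsFin graph \ visited.toFinset).card, frontier.length)
  decreasing_by
  · rcases hf : (pvNext graph (x :: fr)).diff visited with _ | ⟨y, t⟩
    · rw [show PySem.Set.union visited ([] : List String) = visited from rfl]
      exact Prod.Lex.right _ (by simp)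
    · have hy : y ∈ (pvNext graph (x :: fr)).diff visited := by
        rw [hf]; exact List.mem_cons_self
      have hy' := (PySem.Set.mem_diff _ _ _).mp hy
      have hyv : y ∈ pvValsFin graph := by
        rcases (pvMem_fold_union graph (x :: fr) PySem.Set.empty y).mp hy'.1 with he | ⟨v, _, hyg⟩
        · simp [PySem.Set.empty] at he
        · exact List.mem_toFinset.mpr (pvGet_sub_vals graph v y hyg)
      apply Prod.Lex.left
      apply Finset.card_lt_card
      rw [Finset.ssubset_iff_of_subset (Finset.sdiff_subset_sdiff (Finset.Subset.refl _)
        (fun z hz => List.mem_toFinset.mpr ((PySem.Set.mem_union _ _ _).mpr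
          (Or.inl (List.mem_toFinset.mp hz)))))]
      refine ⟨y, Finset.mem_sdiff.mpr ⟨hyv, by simpa using hy'.2⟩, ?_⟩
      intro hmem
      exact (Finset.mem_sdiff.mp hmem).2 (List.mem_toFinset.mpr
        ((PySem.Set.mem_union _ _ _).mpr (Or.inr List.mem_cons_self)))

def cascade_changed_alt (changed : List String) (graph : List (String × List String)) :
    List String :=
  PySem.List.sorted
    (PySem.Set.diff
      (pvLoopB graph (PySem.Set.ofList changed) (PySem.Set.ofList changed))
      (PySem.Set.ofList changed))
    (fun x => x)

-- ===== PRECONDITION & SPEC =====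
def Spec_cascade_changed (changed : List String) (graph : List (String × List String)) (out : List String) : Prop := out = cascade_changed_alt changed graph
instance (changed : List String) (graph : List (String × List String)) (out : List String) : Decidable (Spec_cascade_changed changed graph out) := by unfold Spec_cascade_changed; infer_instance

-- ===== CLAIM (what is proved, stated in full; the proofs are below) =====
def Claim_equal_cascade_changed : Prop := ∀ (changed : List String) (graph : List (String × List String)), Dom_cascade_changed changed graph → Spec_cascade_changed changed graph (cascade_changed changed graph)

-- ===== LEMMAS AND PROOFS =====

inductive pvReach (graph : List (String × List String)) (src : List String) : String → Prop
  | base (x : String) (h : x ∈ src) : pvReach graph src x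
  | step (x y : String) (hx : pvReach graph src x) (hy : y ∈ pvGet graph x) :
      pvReach graph src y

theorem pvReach_subset (graph : List (String × List String)) (changed visited : List String)
    (hch : ∀ c ∈ changed, c ∈ visited)
    (hclosed : ∀ v ∈ visited, ∀ d ∈ pvGet graph v, d ∈ visited) :
    ∀ x, pvReach graph changed x → x ∈ visited := by
  intro x hx
  induction hx with
  | base x h => exact hch x h
  | step x y hx hy ih => exact hclosed x ih y hy

theorem pvMemSplit (s : String) (rest0 : List String) (x : String) :
    x ∈ (s :: rest0) ↔
      x ∈ (s :: rest0).dropLast ∨ x = (s :: rest0).getLast (List.cons_ne_nil s rest0) := by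
  conv_lhs => rw [← List.dropLast_append_getLast (List.cons_ne_nil s rest0)]
  simp [List.mem_append]

theorem pvLoopA_spec (changed : List String) (graph : List (String × List String))
    (ad visited : PySem.Set String) (stack : List String) :
    (∀ x, x ∈ ad ↔ (x ∈ visited ∨ x ∈ stack) ∧ x ∉ changed) →
    ad.Nodup →
    (∀ x, x ∈ visited ∨ x ∈ stack → pvReach graph changed x) →
    (∀ v ∈ visited, ∀ d ∈ pvGet graph v, d ∈ visited ∨ d ∈ stack ∨ d ∈ changed) →
    (∀ c ∈ changed, c ∈ visited ∨ c ∈ stack) →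
    ∃ S, pvLoopA changed graph ad visited stack = PySem.List.sorted S (fun x => x) ∧
      S.Nodup ∧ ∀ x, x ∈ S ↔ (pvReach graph changed x ∧ x ∉ changed) := by
  induction ad, visited, stack using pvLoopA.induct (changed := changed) (graph := graph) with
  | case1 ad visited =>
    intro had hnd hreach hclosed hch
    refine ⟨ad, by rw [pvLoopA], hnd, ?_⟩
    intro x
    rw [had x]
    constructor
    · rintro ⟨hv | hf, hnc⟩
      · exact ⟨hreach x (Or.inl hv), hnc⟩
      · simp at hf
    · rintro ⟨hr, hnc⟩
      have hch' : ∀ c ∈ changed, c ∈ visited := by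
        intro c hc; rcases hch c hc with h | h
        · exact h
        · simp at h
      have hcl' : ∀ v ∈ visited, ∀ d ∈ pvGet graph v, d ∈ visited := by
        intro v hv d hd
        rcases hclosed v hv d hd with h | h | h
        · exact h
        · simp at h
        · exact hch' d h
      exact ⟨Or.inl (pvReach_subset graph changed visited hch' hcl' x hr), hnc⟩
  | case2 ad visited s rest0 h ih =>
    intro had hnd hreach hclosed hch
    have hcv : (s :: rest0).getLast (List.cons_ne_nil s rest0) ∈ visited :=
      (PySem.Set.contains_iff _ _).mp h
    have hiff : ∀ x : String, (x ∈ visited ∨ x ∈ (s :: rest0)) ↔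
        (x ∈ visited ∨ x ∈ (s :: rest0).dropLast) := by
      intro x
      rw [pvMemSplit s rest0 x]
      constructor
      · rintro (hx | hx | rfl)
        exacts [Or.inl hx, Or.inr hx, Or.inl hcv]
      · rintro (hx | hx)
        exacts [Or.inl hx, Or.inr (Or.inl hx)]
    obtain ⟨S, hS1, hS2, hS3⟩ := ih
      (fun x => by rw [had x]; exact and_congr_left' (hiff x))
      hnd
      (fun x hx => hreach x ((hiff x).mpr hx))
      (fun v hv d hd => by
        rcases hclosed v hv d hd with h' | h' | h'
        · exact Or.inl h'
        · rcases (pvMemSplit s rest0 d).mp h' with h'' | h''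
          · exact Or.inr (Or.inl h'')
          · exact Or.inl (h'' ▸ hcv)
        · exact Or.inr (Or.inr h'))
      (fun c hc => (hiff c).mp (hch c hc))
    refine ⟨S, ?_, hS2, hS3⟩
    rw [pvLoopA.eq_2, dif_pos h]
    exact hS1
  | case3 ad visited s rest0 h ih =>
    intro had hnd hreach hclosed hch
    set c := (s :: rest0).getLast (List.cons_ne_nil s rest0) with hc
    set R := (s :: rest0).dropLast with hR
    have hcv : c ∉ visited := fun hm => h ((PySem.Set.contains_iff _ _).mpr hm)
    have hcs : c ∈ (s :: rest0) := List.getLast_mem (List.cons_ne_nil s rest0)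
    set deps := pvGet graph c with hdeps
    set V' := PySem.Set.add visited c with hV'
    set F := deps.filter
      (fun d => !(PySem.Set.contains V' d) && !(changed.contains d)) with hF
    have hst : pvPush changed V' deps ad R = (PySem.Set.update ad F, R ++ F) :=
      pvPush_spec changed V' deps ad R
    have hmemV' : ∀ x : String, x ∈ V' ↔ x ∈ visited ∨ x = c :=
      fun x => PySem.Set.mem_add visited c x
    have hmemF : ∀ x : String, x ∈ F ↔ x ∈ deps ∧ x ∉ V' ∧ x ∉ changed := by
      intro x
      simp [hF, List.mem_filter]
    rw [hst] at ih
    obtain ⟨S, hS1, hS2, hS3⟩ := ih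
      (by
        intro x
        rw [PySem.Set.mem_update, had x, List.mem_append]
        constructor
        · rintro (⟨hv | hs, hnc⟩ | hf)
          · exact ⟨Or.inl ((hmemV' x).mpr (Or.inl hv)), hnc⟩
          · rcases (pvMemSplit s rest0 x).mp hs with h' | h'
            · exact ⟨Or.inr (Or.inl h'), hnc⟩
            · exact ⟨Or.inl ((hmemV' x).mpr (Or.inr h')), hnc⟩
          · rcases (hmemF x).mp hf with ⟨_, _, hnc⟩
            exact ⟨Or.inr (Or.inr hf), hnc⟩
        · rintro ⟨hv | hr | hf, hnc⟩
          · rcases (hmemV' x).mp hv with h' | rfl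
            · exact Or.inl ⟨Or.inl h', hnc⟩
            · exact Or.inl ⟨Or.inr hcs, hnc⟩
          · exact Or.inl ⟨Or.inr ((pvMemSplit s rest0 x).mpr (Or.inl hr)), hnc⟩
          · exact Or.inr hf)
      (PySem.Set.nodup_update ad F hnd)
      (by
        intro x hx
        rcases hx with hv | hrf
        · rcases (hmemV' x).mp hv with h' | rfl
          · exact hreach x (Or.inl h')
          · exact hreach _ (Or.inr hcs)
        · rcases List.mem_append.mp hrf with h' | h'
          · exact hreach x (Or.inr ((pvMemSplit s rest0 x).mpr (Or.inl h')))
          · exact pvReach.step c x (hreach c (Or.inr hcs)) ((hmemF x).mp h').1)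
      (by
        intro v hv d hd
        rcases (hmemV' v).mp hv with hvv | rfl
        · rcases hclosed v hvv d hd with h' | h' | h'
          · exact Or.inl ((hmemV' d).mpr (Or.inl h'))
          · rcases (pvMemSplit s rest0 d).mp h' with h'' | h''
            · exact Or.inr (Or.inl (List.mem_append.mpr (Or.inl h'')))
            · exact Or.inl ((hmemV' d).mpr (Or.inr h''))
          · exact Or.inr (Or.inr h')
        · by_cases hdc : d ∈ changed
          · exact Or.inr (Or.inr hdc)
          · by_cases hdv : d ∈ V'
            · exact Or.inl hdv
            · exact Or.inr (Or.inl (List.mem_append.mpr (Or.inr ((hmemF d).mpr ⟨hd, hdv, hdc⟩)))))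
      (by
        intro cc hcc
        rcases hch cc hcc with h' | h'
        · exact Or.inl ((hmemV' cc).mpr (Or.inl h'))
        · rcases (pvMemSplit s rest0 cc).mp h' with h'' | h''
          · exact Or.inr (List.mem_append.mpr (Or.inl h''))
          · exact Or.inl ((hmemV' cc).mpr (Or.inr h'')))
    refine ⟨S, ?_, hS2, hS3⟩
    rw [pvLoopA.eq_2, dif_neg h, ← hc, ← hR, ← hdeps, ← hV', hst]
    exact hS1
theorem pvLoopB_spec (graph : List (String × List String)) (changed : List String)
    (visited frontier : PySem.Set String) :
    visited.Nodup →
    (∀ x ∈ frontier, x ∈ visited) →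
    (∀ x ∈ visited, pvReach graph changed x) →
    (∀ c ∈ changed, c ∈ visited) →
    (∀ v ∈ visited, v ∉ frontier → ∀ d ∈ pvGet graph v, d ∈ visited) →
    (pvLoopB graph visited frontier).Nodup ∧
      ∀ x, x ∈ pvLoopB graph visited frontier ↔ pvReach graph changed x := by
  induction visited, frontier using pvLoopB.induct (graph := graph) with
  | case1 visited =>
    intro hnd hsub hreach hch hclosed
    rw [pvLoopB.eq_1]
    refine ⟨hnd, fun x => ⟨hreach x, ?_⟩⟩
    exact pvReach_subset graph changed visited hch (fun v hv => hclosed v hv (by simp)) x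
  | case2 visited x fr ih =>
    intro hnd hsub hreach hch hclosed
    set N := pvNext graph (x :: fr) with hN
    set F' := PySem.Set.diff N visited with hF'
    set V' := PySem.Set.union visited F' with hV2
    have hmemN : ∀ y, y ∈ N ↔ ∃ v ∈ (x :: fr), y ∈ pvGet graph v := by
      intro y
      rw [hN, show pvNext graph (x :: fr)
          = (x :: fr).foldl (fun n v => PySem.Set.union n (pvGet graph v)) PySem.Set.empty
        from rfl, pvMem_fold_union]
      simp [PySem.Set.empty]
    have hmemF' : ∀ y, y ∈ F' ↔ y ∈ N ∧ y ∉ visited := fun y => PySem.Set.mem_diff N visited y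
    have hmemV' : ∀ y, y ∈ V' ↔ y ∈ visited ∨ y ∈ F' := fun y => PySem.Set.mem_union _ _ y
    have hres := ih (PySem.Set.nodup_union visited F' hnd)
      (fun y hy => (hmemV' y).mpr (Or.inr hy))
      (fun y hy => by
        rcases (hmemV' y).mp hy with h | h
        · exact hreach y h
        · obtain ⟨v, hv, hyg⟩ := (hmemN y).mp ((hmemF' y).mp h).1
          exact pvReach.step v y (hreach v (hsub v hv)) hyg)
      (fun cc hcc => (hmemV' cc).mpr (Or.inl (hch cc hcc)))
      (fun v hv hvnf d hd => by
        rcases (hmemV' v).mp hv with h | h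
        · by_cases hvf : v ∈ (x :: fr)
          · have hdN : d ∈ N := (hmemN d).mpr ⟨v, hvf, hd⟩
            by_cases hdv : d ∈ visited
            · exact (hmemV' d).mpr (Or.inl hdv)
            · exact (hmemV' d).mpr (Or.inr ((hmemF' d).mpr ⟨hdN, hdv⟩))
          · exact (hmemV' d).mpr (Or.inl (hclosed v h hvf d hd))
        · exact absurd h hvnf)
    rw [pvLoopB.eq_2, ← hN, ← hF', ← hV2]
    exact hres

theorem cascade_changed_spec' (changed : List String) (graph : List (String × List String)) :
    cascade_changed changed graph = cascade_changed_alt changed graph := by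
  obtain ⟨S, hS1, hS2, hS3⟩ := pvLoopA_spec changed graph PySem.Set.empty PySem.Set.empty changed
    (by intro x; simp [PySem.Set.empty])
    (by simp [PySem.Set.empty])
    (by
      intro x hx
      rcases hx with h | h
      · simp [PySem.Set.empty] at h
      · exact pvReach.base x h)
    (by intro v hv; simp [PySem.Set.empty] at hv)
    (fun c hc => Or.inr hc)
  obtain ⟨hBnd, hBmem⟩ := pvLoopB_spec graph changed
    (PySem.Set.ofList changed) (PySem.Set.ofList changed)
    (PySem.Set.nodup_ofList changed)
    (fun y hy => hy)
    (fun y hy => pvReach.base y ((PySem.Set.mem_ofList changed y).mp hy))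
    (fun c hc => (PySem.Set.mem_ofList changed c).mpr hc)
    (fun v hv hnv => absurd hv hnv)
  have hTnd : (PySem.Set.diff (pvLoopB graph (PySem.Set.ofList changed) (PySem.Set.ofList changed))
      (PySem.Set.ofList changed)).Nodup :=
    PySem.Set.nodup_diff _ _ hBnd
  have hTmem : ∀ y, y ∈ PySem.Set.diff
      (pvLoopB graph (PySem.Set.ofList changed) (PySem.Set.ofList changed))
      (PySem.Set.ofList changed) ↔ pvReach graph changed y ∧ y ∉ changed := by
    intro y
    rw [PySem.Set.mem_diff, hBmem y, PySem.Set.mem_ofList]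
  show pvLoopA changed graph PySem.Set.empty PySem.Set.empty changed = _
  rw [hS1]
  exact PySem.List.sorted_eq_sorted_of_perm S _ (fun x => x) (fun a b h => h)
    ((List.perm_ext_iff_of_nodup hS2 hTnd).mpr (fun a => by rw [hS3 a, hTmem a]))

-- ===== VERDICT (by name: the statement is the Claim_ definition above) =====
theorem cascade_changed_spec : Claim_equal_cascade_changed := by
  intro changed graph _
  exact cascade_changed_spec' changed graph
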